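-- pv_equiv track=rewrite | github.com/KarchinLab/probabilistic2020 | permutation2020/python/indel.py | get_frameshift_lengths
-- ===== SOURCE A (Python) =====
-- def get_frameshift_lengths(num_bins):
--     """Simple function that returns the lengths for each frameshift category
--     if `num_bins` number of frameshift categories are requested.
--     """
--     fs_len = []
--     i = 1
--     tmp_bins = 0
--     while(tmp_bins<num_bins):
--         if i%3:
--             fs_len.append(i)
--             tmp_bins += 1
--         i += 1
--     return fs_len
-- ===== SOURCE B (Python) =====
-- def get_frameshift_lengths(num_bins):
--     """Build the blocks [3m+1, 3m+2] for each m, flatten, and cut to num_bins."""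
--     pairs = [[3 * m + 1, 3 * m + 2] for m in range((num_bins + 1) // 2)]
--     flat = [x for pair in pairs for x in pair]
--     return flat[:num_bins]
-- ===== Notes on version B (the rewrite author's own statement) =====
-- stated objective: alternative
-- what changed: B generates the kept values directly as flattened pairs [3m+1, 3m+2] over m in range((num_bins+1)//2) and slices to num_bins, instead of A's while-loop that scans all integers and tests divisibility by 3.
import Mathlib
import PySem

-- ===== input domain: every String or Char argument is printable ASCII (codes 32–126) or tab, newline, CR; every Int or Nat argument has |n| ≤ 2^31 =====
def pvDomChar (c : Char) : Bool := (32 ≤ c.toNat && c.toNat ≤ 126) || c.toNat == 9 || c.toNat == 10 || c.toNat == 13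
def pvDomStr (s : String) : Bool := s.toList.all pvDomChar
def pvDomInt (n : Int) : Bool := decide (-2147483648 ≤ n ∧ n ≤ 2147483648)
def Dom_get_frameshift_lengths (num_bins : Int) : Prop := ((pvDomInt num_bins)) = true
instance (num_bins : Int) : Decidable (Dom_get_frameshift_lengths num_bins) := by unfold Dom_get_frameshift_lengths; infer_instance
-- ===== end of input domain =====

-- B generates the values as flattened pairs [3m+1,3m+2] and slices to num_bins, instead of A's skip-and-test while loop (objective: alternative).

-- ===== PORT A =====
-- while tmp_bins < num_bins: if i%3: append i; tmp_bins += 1; i += 1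
-- (fuel only makes the loop structurally total; 2*num_bins.toNat + 2 always suffices)
def pvALoop (fuel : Nat) (n : Int) (fs : List Int) (i tmp : Int) : List Int :=
  match fuel with
  | 0 => fs
  | fuel + 1 =>
    if tmp < n then
      if PySem.Int.mod i 3 ≠ 0 then
        pvALoop fuel n (fs ++ [i]) (i + 1) (tmp + 1)
      else
        pvALoop fuel n fs (i + 1) tmp
    else fs

def get_frameshift_lengths (num_bins : Int) : List Int :=
  pvALoop (2 * num_bins.toNat + 2) num_bins [] 1 0

-- ===== PORT B =====
-- pairs = [[3*m+1, 3*m+2] for m in range((num_bins+1)//2)]; flat = flatten(pairs); flat[:num_bins]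
def get_frameshift_lengths_alt (num_bins : Int) : List Int :=
  let pairs := (PySem.List.pyRange 0 (PySem.Int.floordiv (num_bins + 1) 2) 1).map
    (fun m => [3 * m + 1, 3 * m + 2])
  let flat := pairs.flatMap id
  PySem.List.slice flat none (some num_bins)

-- ===== PRECONDITION & SPEC =====
def Spec_get_frameshift_lengths (num_bins : Int) (out : List Int) : Prop := out = get_frameshift_lengths_alt num_bins
instance (num_bins : Int) (out : List Int) : Decidable (Spec_get_frameshift_lengths num_bins out) := by unfold Spec_get_frameshift_lengths; infer_instance

-- ===== CLAIM =====
def Claim_equal_get_frameshift_lengths : Prop := ∀ (num_bins : Int), Dom_get_frameshift_lengths num_bins → Spec_get_frameshift_lengths num_bins (get_frameshift_lengths num_bins)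

-- ===== LEMMAS AND PROOFS =====

-- the closed form of the j-th kept value (j : Nat, 0-indexed)
def pvVal (j : Nat) : Int := 3 * ((j : Int) / 2) + (j : Int) % 2 + 1

lemma pvALoop_stop (fuel : Nat) (n : Int) (fs : List Int) (i tmp : Int) (h : ¬ tmp < n) :
    pvALoop fuel n fs i tmp = fs := by
  cases fuel <;> simp [pvALoop, h]

-- A's loop, entered at count tmp with i at the closed-form value, appends exactly the closed-form tail.
lemma pvALoop_char (d : Nat) :
    ∀ (n : Int) (fs : List Int) (tmp : Nat) (fa : Nat), (n - tmp).toNat ≤ d →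
      2 * (n - tmp).toNat + 1 ≤ fa →
      pvALoop fa n fs (pvVal tmp) tmp
        = fs ++ (List.range (n - tmp).toNat).map (fun j => pvVal (tmp + j)) := by
  induction d with
  | zero =>
    intro n fs tmp fa hd hfa
    have h : ¬ (tmp : Int) < n := by omega
    rw [pvALoop_stop _ _ _ _ _ h]
    have h0 : (n - tmp).toNat = 0 := by omega
    simp [h0]
  | succ d ih =>
    intro n fs tmp fa hd hfa
    by_cases hlt : (tmp : Int) < n
    · obtain ⟨fa', rfl⟩ : ∃ fa', fa = fa' + 1 := ⟨fa - 1, by omega⟩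
      have hmne : PySem.Int.mod (pvVal tmp) 3 ≠ 0 := by
        rw [PySem.Int.mod_eq_emod_of_pos (by omega : (0:Int) < 3)]; unfold pvVal; omega
      rw [pvALoop, if_pos hlt, if_pos hmne]
      have hrange : (n - (tmp:Int)).toNat = ((n - (tmp:Int) - 1).toNat) + 1 := by omega
      rcases Nat.even_or_odd tmp with ⟨t, ht⟩ | ⟨t, ht⟩
      · -- tmp even: i+1 is the closed form at tmp+1
        have hi : pvVal tmp + 1 = pvVal (tmp + 1) := by
          unfold pvVal; subst ht; push_cast; omega
        have hrec := ih n (fs ++ [pvVal tmp]) (tmp + 1) fa' (by push_cast; omega)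
          (by push_cast; omega)
        push_cast at hrec
        rw [hi, hrec, hrange, List.range_succ_eq_map, List.append_assoc]
        simp [List.map_map, Function.comp_def]
        have hcnt : (n - ((tmp:Int) + 1)).toNat = n.toNat - tmp - 1 := by omega
        rw [hcnt]
        apply List.map_congr_left; intro j _; congr 1; omega
      · -- tmp odd: next i is a multiple of 3, one skipped iteration
        by_cases hlt2 : (tmp : Int) + 1 < n
        · obtain ⟨fa'', rfl⟩ : ∃ fa'', fa' = fa'' + 1 := ⟨fa' - 1, by omega⟩
          have hm0 : ¬ PySem.Int.mod (pvVal tmp + 1) 3 ≠ 0 := by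
            rw [PySem.Int.mod_eq_emod_of_pos (by omega : (0:Int) < 3)]
            unfold pvVal; subst ht; push_cast; omega
          rw [pvALoop, if_pos hlt2, if_neg hm0]
          have hi : pvVal tmp + 1 + 1 = pvVal (tmp + 1) := by
            unfold pvVal; subst ht; push_cast; omega
          have hrec := ih n (fs ++ [pvVal tmp]) (tmp + 1) fa'' (by push_cast; omega)
            (by push_cast; omega)
          push_cast at hrec
          rw [hi, hrec, hrange, List.range_succ_eq_map, List.append_assoc]
          simp [List.map_map, Function.comp_def]
          have hcnt : (n - ((tmp:Int) + 1)).toNat = n.toNat - tmp - 1 := by omega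
          rw [hcnt]
          apply List.map_congr_left; intro j _; congr 1; omega
        · rw [pvALoop_stop _ _ _ _ _ hlt2]
          have h1 : (n - (tmp:Int)).toNat = 1 := by omega
          simp [h1]
    · rw [pvALoop_stop _ _ _ _ _ hlt]
      have h0 : (n - (tmp:Int)).toNat = 0 := by omega
      simp [h0]

-- B's flattened pairs are the closed-form values in order.
lemma pvFlat_eq (q : Nat) :
    List.flatMap (fun m : Nat => [3 * (m : Int) + 1, 3 * (m : Int) + 2]) (List.range q)
      = (List.range (2 * q)).map pvVal := by
  induction q with
  | zero => simp
  | succ q ih =>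
    rw [List.range_succ, List.flatMap_append, ih]
    have h2 : 2 * (q + 1) = (2 * q + 1) + 1 := by omega
    rw [h2, List.range_succ, List.range_succ]
    have e1 : pvVal (2 * q) = 3 * (q : Int) + 1 := by unfold pvVal; push_cast; omega
    have e2 : pvVal (2 * q + 1) = 3 * (q : Int) + 2 := by unfold pvVal; push_cast; omega
    simp [e1, e2]

-- ===== VERDICT =====
theorem get_frameshift_lengths_spec : Claim_equal_get_frameshift_lengths := by
  intro n _
  unfold Spec_get_frameshift_lengths get_frameshift_lengths get_frameshift_lengths_alt
  have hA := pvALoop_char ((n : Int) - (0:Nat)).toNat n [] 0 (2 * n.toNat + 2)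
    (le_refl _) (by push_cast; omega)
  simp only [Nat.cast_zero, Int.sub_zero, List.nil_append, Nat.zero_add] at hA
  have hval : pvVal 0 = 1 := by decide
  rw [hval] at hA
  rw [hA]
  -- B side
  set p : Int := PySem.Int.floordiv (n + 1) 2 with hp
  have hpe : p = (n + 1) / 2 := by
    rw [hp, PySem.Int.floordiv_eq_ediv_of_pos (by omega : (0:Int) < 2)]
  rw [PySem.List.pyRange_one]
  simp only [Int.sub_zero, List.map_map, List.flatMap_map, Function.comp_def, id_eq,
    Int.zero_add]
  rw [pvFlat_eq p.toNat]
  by_cases hn : n ≤ 0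
  · have hp0 : p.toNat = 0 := by omega
    have hn0 : n.toNat = 0 := by omega
    simp [hp0, hn0, PySem.List.slice]
  · rw [PySem.List.slice_to _ (by omega : (0:Int) ≤ n)]
    rw [← List.map_take, List.take_range]
    have : min n.toNat (2 * p.toNat) = n.toNat := by omega
    rw [this]
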